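-- pv_equiv track=rewrite | github.com/outtathe/tasya_kr | src/task3.py | variant_1
-- ===== SOURCE A (Python) =====
-- def variant_1(matrix):
--     """
--     Отсортируйте по возрастанию четные столбцы заданного массива.
--     """
--     num_rows = len(matrix)
--     num_cols = len(matrix[0])
--
--     for col in range(0, num_cols, 2):
--         for i in range(num_rows - 1):
--             for j in range(num_rows - i - 1):
--                 if matrix[j][col] > matrix[j + 1][col]:
--                     matrix[j][col], matrix[j + 1][col] = matrix[j + 1][col], matrix[j][col]
--
--     return matrix
-- ===== SOURCE B (Python) =====
-- def variant_1(matrix):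
--     num_cols = len(matrix[0])
--     for col in range(0, num_cols, 2):
--         column = sorted(row[col] for row in matrix)
--         for row, v in zip(matrix, column):
--             row[col] = v
--     return matrix
-- ===== Notes on version B (the rewrite author's own statement) =====
-- stated objective: faster
-- what changed: A bubble-sorts each even column in place with a triple-nested loop of element swaps; B extracts each even column as a list, sorts it with the built-in sorted(), and writes the sorted values back row by row (in Python B also mutates the rows in place, like A).
import Mathlib
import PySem

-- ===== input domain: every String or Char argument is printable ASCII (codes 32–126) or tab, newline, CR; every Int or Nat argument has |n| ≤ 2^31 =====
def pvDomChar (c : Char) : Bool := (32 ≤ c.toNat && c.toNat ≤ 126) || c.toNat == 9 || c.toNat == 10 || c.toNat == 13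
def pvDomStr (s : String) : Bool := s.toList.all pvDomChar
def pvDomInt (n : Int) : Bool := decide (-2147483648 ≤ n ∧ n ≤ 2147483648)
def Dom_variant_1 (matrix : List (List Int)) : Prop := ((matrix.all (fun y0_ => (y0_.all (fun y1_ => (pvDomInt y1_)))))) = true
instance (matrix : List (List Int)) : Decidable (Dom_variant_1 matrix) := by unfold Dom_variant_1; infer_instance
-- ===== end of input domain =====

-- B replaces A's in-place triple-nested bubble sort of each even column by extracting each even
-- column, sorting it with the built-in sort, and writing it back (same return value; both mutate
-- the argument rows in place in Python).

-- ===== PORT A =====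
def variant_1 (matrix : List (List Int)) : List (List Int) :=
  let numRows := matrix.length
  let numCols := (matrix.headD []).length
  (PySem.List.pyRange 0 (numCols : Int) 2).foldl (fun m col =>
    (List.range (numRows - 1)).foldl (fun m i =>
      (List.range (numRows - 1 - i)).foldl (fun m j =>
        if PySem.List.pyGetD (m.getD (j+1) []) col 0 <
            PySem.List.pyGetD (m.getD j []) col 0 then
          (m.set j (PySem.List.pySetD (m.getD j []) col
              (PySem.List.pyGetD (m.getD (j+1) []) col 0))).set (j+1)
            (PySem.List.pySetD (m.getD (j+1) []) col
              (PySem.List.pyGetD (m.getD j []) col 0))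
        else m) m) m) matrix

-- ===== PORT B =====
def variant_1_alt (matrix : List (List Int)) : List (List Int) :=
  let numCols := (matrix.headD []).length
  (PySem.List.pyRange 0 (numCols : Int) 2).foldl (fun m col =>
    let column := PySem.List.sorted (m.map (fun row => PySem.List.pyGetD row col 0)) (fun x => x)
    (m.zip column).map (fun rv => PySem.List.pySetD rv.1 col rv.2)) matrix

-- ===== PRECONDITION & SPEC =====
-- Pre_ excludes exactly the inputs where Python A raises IndexError: the empty matrix
-- (matrix[0]) and ragged matrices with ≥ 2 rows where some row lacks an even column index
-- that row 0 has (matrix[j][col]).  (With a single row the inner loops never run, and the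
-- condition below then holds trivially, so such inputs stay inside Pre_.)
def Pre_variant_1 (matrix : List (List Int)) : Prop :=
  matrix ≠ [] ∧ ∀ row ∈ matrix, ∀ c < (matrix.headD []).length, c % 2 = 0 → c < row.length
instance (matrix : List (List Int)) : Decidable (Pre_variant_1 matrix) := by unfold Pre_variant_1; infer_instance
def pvWitness_variant_1 : List (List Int) := [[3, 7, 1], [1, 5, 2], [2, 6, 0]]
def Spec_variant_1 (matrix : List (List Int)) (out : List (List Int)) : Prop := out = variant_1_alt matrix
instance (matrix : List (List Int)) (out : List (List Int)) : Decidable (Spec_variant_1 matrix out) := by unfold Spec_variant_1; infer_instance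

-- ===== CLAIM (what is proved, stated in full; the proofs are below) =====
def Claim_equal_variant_1 : Prop := ∀ (matrix : List (List Int)), Dom_variant_1 matrix → Pre_variant_1 matrix → Spec_variant_1 matrix (variant_1 matrix)

-- ===== LEMMAS AND PROOFS =====

-- Column abstraction: read a column, write it back; A's swap/pass/bubble in column space.
def getCol (m : List (List Int)) (c : Nat) : List Int := m.map (fun row => row.getD c 0)
def appCol (m : List (List Int)) (c : Nat) (v : List Int) : List (List Int) :=
  (m.zip v).map (fun rv => rv.1.set c rv.2)
def RowsOK (m : List (List Int)) (c : Nat) : Prop := ∀ row ∈ m, c < row.length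
def swapC (g : List Int) (j : Nat) : List Int :=
  if g.getD (j+1) 0 < g.getD j 0 then (g.set j (g.getD (j+1) 0)).set (j+1) (g.getD j 0) else g
def passC (g : List Int) (k : Nat) : List Int := (List.range k).foldl swapC g
def bubbleC (n : Nat) (g : List Int) : List Int :=
  (List.range (n-1)).foldl (fun g i => passC g (n-1-i)) g

lemma length_swapC (g : List Int) (j : Nat) : (swapC g j).length = g.length := by
  unfold swapC; split <;> simp

lemma getD_set_ne (l : List Int) (i j : Nat) (v : Int) (h : i ≠ j) :
    (l.set i v).getD j 0 = l.getD j 0 := by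
  simp [List.getD, h]

lemma getD_set_self (l : List Int) (i : Nat) (v : Int) (h : i < l.length) :
    (l.set i v).getD i 0 = v := by
  simp [List.getD, h]

lemma getD_eq_of_drop_eq (x y : List Int) (s : Nat) (h : x.drop s = y.drop s)
    (q : Nat) (hq : s ≤ q) : x.getD q 0 = y.getD q 0 := by
  have hx : x[q]? = (x.drop s)[q - s]? := by rw [List.getElem?_drop]; congr 1; omega
  have hy : y[q]? = (y.drop s)[q - s]? := by rw [List.getElem?_drop]; congr 1; omega
  simp [List.getD, hx, hy, h]

lemma passC_spec (g : List Int) (k : Nat) (hk : k < g.length) :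
    (passC g k).length = g.length ∧
    ((passC g k).take (k+1)).Perm (g.take (k+1)) ∧
    (passC g k).drop (k+1) = g.drop (k+1) ∧
    (∀ p, p ≤ k → (passC g k).getD p 0 ≤ (passC g k).getD k 0) := by
  induction k with
  | zero =>
    refine ⟨rfl, List.Perm.refl _, rfl, ?_⟩
    intro p hp; interval_cases p; exact le_refl _
  | succ k ih =>
    obtain ⟨hlen, htake, hdrop, hmax⟩ := ih (by omega)
    have hstep : passC g (k+1) = swapC (passC g k) k := by
      simp [passC, List.range_succ]
    set d := passC g k with hd
    have hk1 : k + 1 < d.length := by omega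
    have hkd : k < d.length := by omega
    have hdk : d.getD k 0 = d[k] := List.getD_eq_getElem d 0 hkd
    have hdk1 : d.getD (k+1) 0 = d[k+1] := List.getD_eq_getElem d 0 hk1
    have hdropg : d.drop (k+2) = g.drop (k+2) := by
      have h := congrArg (List.drop 1) hdrop
      rw [List.drop_drop, List.drop_drop] at h
      convert h using 2
    have htakeg : (d.take (k+2)).Perm (g.take (k+2)) := by
      have h2 : d.take (k+2) = d.take (k+1) ++ d[k+1]?.toList := List.take_add_one
      have h3 : g.take (k+2) = g.take (k+1) ++ g[k+1]?.toList := List.take_add_one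
      have h4 : d[k+1]? = g[k+1]? := by
        have := congrArg (fun l => l[0]?) hdrop
        simpa [List.getElem?_drop] using this
      rw [h2, h3, h4]
      exact htake.append_right _
    rw [hstep]
    unfold swapC
    split
    · rename_i hlt
      set e := (d.set k (d.getD (k+1) 0)).set (k+1) (d.getD k 0) with he
      have hle : e.length = d.length := by simp [he]
      have hfull : e.Perm d := by
        rw [he, hdk, hdk1]; exact List.set_set_perm hkd hk1
      have h5 : e.drop (k+2) = d.drop (k+2) := by
        rw [he, List.drop_set_of_lt (by omega), List.drop_set_of_lt (by omega)]
      have heperm : (e.take (k+2)).Perm (d.take (k+2)) := by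
        have hsplit : (e.take (k+2) ++ e.drop (k+2)).Perm (d.take (k+2) ++ d.drop (k+2)) := by
          rw [List.take_append_drop, List.take_append_drop]; exact hfull
        rw [h5] at hsplit
        exact (List.perm_append_right_iff _).mp hsplit
      refine ⟨by omega, heperm.trans htakeg, by rw [h5, hdropg], ?_⟩
      intro p hp
      have hek1 : e.getD (k+1) 0 = d.getD k 0 := by
        rw [he, getD_set_self _ _ _ (by simpa using hk1)]
      rw [hek1]
      rcases Nat.lt_or_ge p (k+1) with hpk | hpk
      · rcases Nat.eq_or_lt_of_le (Nat.le_of_lt_succ hpk) with rfl | hpk'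
        · have hep : e.getD p 0 = d.getD (p+1) 0 := by
            rw [he, getD_set_ne _ _ _ _ (by omega), getD_set_self _ _ _ (by omega)]
          rw [hep]; exact le_of_lt hlt
        · have hep : e.getD p 0 = d.getD p 0 := by
            rw [he, getD_set_ne _ _ _ _ (by omega), getD_set_ne _ _ _ _ (by omega)]
          rw [hep]; exact hmax p (by omega)
      · have hpe : p = k + 1 := by omega
        subst hpe; rw [hek1]
    · rename_i hge
      rw [not_lt] at hge
      refine ⟨by omega, htakeg, hdropg, ?_⟩
      intro p hp
      rcases Nat.lt_or_ge p (k+1) with hpk | hpk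
      · exact le_trans (hmax p (Nat.le_of_lt_succ hpk)) hge
      · have hpe : p = k + 1 := by omega
        subst hpe; exact le_refl _

lemma length_passC (g : List Int) (k : Nat) : (passC g k).length = g.length := by
  unfold passC
  induction (List.range k) generalizing g with
  | nil => rfl
  | cons j L ih => simp only [List.foldl_cons]; rw [ih, length_swapC]

lemma bubble_aux (g : List Int) (n : Nat) (hn : n = g.length) (t : Nat) (ht : t ≤ n - 1) :
    ((List.range t).foldl (fun g i => passC g (n-1-i)) g).length = n ∧
    ((List.range t).foldl (fun g i => passC g (n-1-i)) g).Perm g ∧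
    (∀ p q, p < q → n - t ≤ q → q < n →
      ((List.range t).foldl (fun g i => passC g (n-1-i)) g).getD p 0 ≤
      ((List.range t).foldl (fun g i => passC g (n-1-i)) g).getD q 0) := by
  induction t with
  | zero =>
    refine ⟨hn.symm, List.Perm.refl _, ?_⟩
    intro p q hpq hq1 hq2; omega
  | succ t ih =>
    obtain ⟨hlen, hperm, hinv⟩ := ih (by omega)
    have hn1 : 1 ≤ n := by omega
    set c := (List.range t).foldl (fun g i => passC g (n-1-i)) g with hc
    set k := n - 1 - t with hkdef
    have hstep : (List.range (t+1)).foldl (fun g i => passC g (n-1-i)) g = passC c k := by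
      rw [List.range_succ, List.foldl_append, ← hc]; rfl
    have hkc : k < c.length := by omega
    obtain ⟨plen, ptake, pdrop, pmax⟩ := passC_spec c k hkc
    set e := passC c k with hedef
    have hefull : e.Perm c := by
      have hsplit : (e.take (k+1) ++ e.drop (k+1)).Perm (c.take (k+1) ++ c.drop (k+1)) := by
        rw [pdrop]; exact ptake.append_right _
      rwa [List.take_append_drop, List.take_append_drop] at hsplit
    rw [hstep]
    refine ⟨by omega, hefull.trans hperm, ?_⟩
    intro p q hpq hq1 hq2
    have hq1' : k ≤ q := by omega
    rcases Nat.eq_or_lt_of_le hq1' with rfl | hqk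
    · -- q = k : pass max property
      exact pmax p (by omega)
    · -- q > k : e agrees with c at q
      have heq : e.getD q 0 = c.getD q 0 := getD_eq_of_drop_eq e c (k+1) pdrop q (by omega)
      rw [heq]
      rcases Nat.lt_or_ge p (k+1) with hpk | hpk
      · -- p ≤ k : e[p] is in e.take (k+1), a perm of c.take (k+1)
        have hple : p < (e.take (k+1)).length := by
          rw [List.length_take]; omega
        have hmem : e.getD p 0 ∈ e.take (k+1) := by
          have : e.getD p 0 = (e.take (k+1))[p] := by
            rw [List.getElem_take, List.getD_eq_getElem e 0 (by omega)]
          rw [this]; exact List.getElem_mem hple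
        have hmem' : e.getD p 0 ∈ c.take (k+1) := ptake.mem_iff.mp hmem
        obtain ⟨i, hi, hieq⟩ := List.getElem_of_mem hmem'
        have hi' : i < k + 1 := by
          have := hi; rw [List.length_take] at this; omega
        have : e.getD p 0 = c.getD i 0 := by
          rw [← hieq, List.getElem_take, List.getD_eq_getElem c 0 (by omega)]
        rw [this]
        exact hinv i q (by omega) (by omega) hq2
      · -- p > k : both unchanged
        have hep : e.getD p 0 = c.getD p 0 := getD_eq_of_drop_eq e c (k+1) pdrop p (by omega)
        rw [hep]
        exact hinv p q hpq (by omega) hq2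

lemma bubbleC_sorted (g : List Int) :
    (PySem.List.sorted g (fun x => x)) = bubbleC g.length g := by
  rcases Nat.eq_zero_or_pos g.length with h0 | h1
  · have : g = [] := List.eq_nil_of_length_eq_zero h0
    subst this; rfl
  · unfold bubbleC
    obtain ⟨hlen, hperm, hinv⟩ := bubble_aux g g.length rfl (g.length - 1) (le_refl _)
    refine PySem.List.sorted_id_eq_of_perm_of_pairwise g _ hperm ?_
    rw [List.pairwise_iff_getElem]
    intro i j hi hj hij
    have hi' : i < g.length := by rw [hlen] at hi; exact hi
    have hj' : j < g.length := by rw [hlen] at hj; exact hj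
    have hgd := hinv i j hij (by omega) (by omega)
    rwa [List.getD_eq_getElem _ 0 hi, List.getD_eq_getElem _ 0 hj] at hgd

lemma appCol_getCol (m : List (List Int)) (c : Nat) (hc : RowsOK m c) :
    appCol m c (getCol m c) = m := by
  induction m with
  | nil => rfl
  | cons r t ih =>
    have hr : c < r.length := hc r (by simp)
    simp only [appCol, getCol, List.map_cons, List.zip_cons_cons, List.map_cons] at *
    congr 1
    · rw [List.getD_eq_getElem r 0 hr]; exact List.set_getElem_self hr
    · exact ih (fun row hrow => hc row (by simp [hrow]))

lemma length_appCol (m : List (List Int)) (c : Nat) (v : List Int)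
    (hv : v.length = m.length) : (appCol m c v).length = m.length := by
  simp [appCol, hv]

lemma getElem_appCol (m : List (List Int)) (c : Nat) (v : List Int) (r : Nat)
    (hv : v.length = m.length) (hr : r < m.length) :
    (appCol m c v)[r]'(by rw [length_appCol m c v hv]; exact hr) =
      m[r].set c (v[r]'(by omega)) := by
  simp [appCol, List.getElem_zip]

lemma getD_getCol (m : List (List Int)) (c j : Nat) (hj : j < m.length) :
    (getCol m c).getD j 0 = (m.getD j []).getD c 0 := by
  rw [List.getD_eq_getElem _ 0 (by simpa [getCol] using hj), List.getD_eq_getElem m [] hj]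
  simp [getCol]

lemma swap_factor (m : List (List Int)) (c j : Nat) (hc : RowsOK m c) (hj : j + 1 < m.length) :
    (if PySem.List.pyGetD (m.getD (j+1) []) ((c : Nat) : Int) 0 <
          PySem.List.pyGetD (m.getD j []) ((c : Nat) : Int) 0 then
        (m.set j (PySem.List.pySetD (m.getD j []) ((c : Nat) : Int)
            (PySem.List.pyGetD (m.getD (j+1) []) ((c : Nat) : Int) 0))).set (j+1)
          (PySem.List.pySetD (m.getD (j+1) []) ((c : Nat) : Int)
            (PySem.List.pyGetD (m.getD j []) ((c : Nat) : Int) 0))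
      else m) = appCol m c (swapC (getCol m c) j) := by
  have hj0 : j < m.length := by omega
  have ha : PySem.List.pyGetD (m.getD j []) ((c : Nat) : Int) 0 = (getCol m c).getD j 0 := by
    rw [PySem.List.pyGetD_natCast, getD_getCol m c j hj0]
  have hb : PySem.List.pyGetD (m.getD (j+1) []) ((c : Nat) : Int) 0 = (getCol m c).getD (j+1) 0 := by
    rw [PySem.List.pyGetD_natCast, getD_getCol m c (j+1) hj]
  set g := getCol m c with hg
  have hglen : g.length = m.length := by simp [hg, getCol]
  rw [ha, hb, PySem.List.pySetD_natCast, PySem.List.pySetD_natCast]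
  unfold swapC
  split
  · -- swap branch
    set w := (g.set j (g.getD (j+1) 0)).set (j+1) (g.getD j 0) with hw
    have hwlen : w.length = m.length := by simp [hw, hglen]
    apply List.ext_getElem
    · rw [length_appCol m c w hwlen]; simp
    · intro r hr1 hr2
      have hrm : r < m.length := by simpa using hr1
      rw [getElem_appCol m c w r hwlen hrm]
      by_cases hrj : r = j
      · subst hrj
        rw [List.getElem_set_ne (by omega), List.getElem_set_self (by simpa using hj0)]
        have hwr : w[r]'(by omega) = g.getD (r+1) 0 := by
          rw [← List.getD_eq_getElem w 0 (by omega), hw,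
            getD_set_ne _ _ _ _ (by omega), getD_set_self _ _ _ (by rwa [hglen])]
        rw [hwr, List.getD_eq_getElem m [] hrm]
      · by_cases hrj1 : r = j + 1
        · subst hrj1
          rw [List.getElem_set_self (by simp [hj])]
          have hwr : w[j+1]'(by omega) = g.getD j 0 := by
            rw [← List.getD_eq_getElem w 0 (by omega), hw,
              getD_set_self _ _ _ (by rw [List.length_set, hglen]; omega)]
          rw [hwr, List.getD_eq_getElem m [] hj]
        · rw [List.getElem_set_ne (by omega), List.getElem_set_ne (by omega)]
          have hwr : w[r]'(by omega) = g.getD r 0 := by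
            rw [← List.getD_eq_getElem w 0 (by omega), hw,
              getD_set_ne _ _ _ _ (by omega), getD_set_ne _ _ _ _ (by omega)]
          have hgr : g.getD r 0 = m[r].getD c 0 := by
            rw [List.getD_eq_getElem g 0 (by omega)]; simp [hg, getCol]
          rw [hwr, hgr, List.getD_eq_getElem m[r] 0 (hc m[r] (List.getElem_mem hrm)),
            List.set_getElem_self]
  · exact (appCol_getCol m c hc).symm


lemma getCol_appCol (m : List (List Int)) (c : Nat) (v : List Int)
    (hv : v.length = m.length) (hc : RowsOK m c) : getCol (appCol m c v) c = v := by
  induction m generalizing v with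
  | nil => simp at hv; simp [appCol, getCol, hv]
  | cons r t ih =>
    cases v with
    | nil => simp at hv
    | cons x xs =>
      have hr : c < r.length := hc r (by simp)
      simp only [appCol, getCol, List.zip_cons_cons, List.map_cons]
      congr 1
      · simp [List.getD, hr]
      · exact ih xs (by simpa using hv) (fun row hrow => hc row (by simp [hrow]))

lemma appCol_appCol (m : List (List Int)) (c : Nat) (v w : List Int)
    (hv : v.length = m.length) : appCol (appCol m c v) c w = appCol m c w := by
  induction m generalizing v w with
  | nil => simp [appCol]
  | cons r t ih =>
    cases v with
    | nil => simp at hv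
    | cons x xs =>
      cases w with
      | nil => simp [appCol]
      | cons y ys =>
        simp only [appCol, List.zip_cons_cons, List.map_cons, List.set_set]
        congr 1
        exact ih xs ys (by simpa using hv)

lemma map_length_appCol (m : List (List Int)) (c : Nat) (v : List Int)
    (hv : v.length = m.length) : (appCol m c v).map List.length = m.map List.length := by
  induction m generalizing v with
  | nil => simp [appCol]
  | cons r t ih =>
    cases v with
    | nil => simp at hv
    | cons x xs =>
      simp only [appCol, List.zip_cons_cons, List.map_cons, List.length_set]
      exact congrArg _ (ih xs (by simpa using hv))

lemma rowsOK_of_map_length (m m' : List (List Int)) (c : Nat)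
    (h : m'.map List.length = m.map List.length) (hc : RowsOK m c) : RowsOK m' c := by
  intro row hrow
  have : row.length ∈ m'.map List.length := List.mem_map_of_mem hrow
  rw [h] at this
  obtain ⟨r, hr, he⟩ := List.mem_map.mp this
  rw [← he]; exact hc r hr

lemma foldl_lift {ι : Type} (L : List ι) (m : List (List Int)) (c : Nat)
    (F : List (List Int) → ι → List (List Int)) (G : List Int → ι → List Int)
    (hG : ∀ v i, i ∈ L → v.length = m.length → (G v i).length = v.length)
    (hF : ∀ v i, i ∈ L → v.length = m.length → F (appCol m c v) i = appCol m c (G v i)) :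
    ∀ v, v.length = m.length → L.foldl F (appCol m c v) = appCol m c (L.foldl G v) := by
  induction L with
  | nil => intro v hv; simp
  | cons i L ih =>
    intro v hv
    simp only [List.foldl_cons]
    rw [hF v i (by simp) hv]
    exact ih (fun v j hj hv => hG v j (by simp [hj]) hv)
      (fun v j hj hv => hF v j (by simp [hj]) hv) (G v i) (by rw [hG v i (by simp) hv, hv])

lemma length_bubbleC (n : Nat) (g : List Int) : (bubbleC n g).length = g.length := by
  unfold bubbleC
  induction (List.range (n-1)) generalizing g with
  | nil => rfl
  | cons i L ih => simp only [List.foldl_cons]; rw [ih, length_passC]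

lemma inner_lift (m : List (List Int)) (c k : Nat) (hc : RowsOK m c) (hk : k < m.length)
    (v : List Int) (hv : v.length = m.length) :
    (List.range k).foldl (fun m j =>
        if PySem.List.pyGetD (m.getD (j+1) []) ((c : Nat) : Int) 0 <
            PySem.List.pyGetD (m.getD j []) ((c : Nat) : Int) 0 then
          (m.set j (PySem.List.pySetD (m.getD j []) ((c : Nat) : Int)
              (PySem.List.pyGetD (m.getD (j+1) []) ((c : Nat) : Int) 0))).set (j+1)
            (PySem.List.pySetD (m.getD (j+1) []) ((c : Nat) : Int)
              (PySem.List.pyGetD (m.getD j []) ((c : Nat) : Int) 0))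
        else m) (appCol m c v) = appCol m c (passC v k) := by
  refine foldl_lift _ m c _ swapC (fun v j _ _ => length_swapC v j) ?_ v hv
  intro w j hj hw
  have hj1 : j + 1 < m.length := by
    have := List.mem_range.mp hj; omega
  have hro : RowsOK (appCol m c w) c :=
    rowsOK_of_map_length m _ c (map_length_appCol m c w hw) hc
  have hsf := swap_factor (appCol m c w) c j hro (by rw [length_appCol m c w hw]; exact hj1)
  rw [hsf, getCol_appCol m c w hw hc, appCol_appCol m c w _ hw]

lemma outer_lift (m : List (List Int)) (c n : Nat) (hn : n = m.length) (hc : RowsOK m c) :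
    (List.range (n - 1)).foldl (fun m i =>
      (List.range (n - 1 - i)).foldl (fun m j =>
        if PySem.List.pyGetD (m.getD (j+1) []) ((c : Nat) : Int) 0 <
            PySem.List.pyGetD (m.getD j []) ((c : Nat) : Int) 0 then
          (m.set j (PySem.List.pySetD (m.getD j []) ((c : Nat) : Int)
              (PySem.List.pyGetD (m.getD (j+1) []) ((c : Nat) : Int) 0))).set (j+1)
            (PySem.List.pySetD (m.getD (j+1) []) ((c : Nat) : Int)
              (PySem.List.pyGetD (m.getD j []) ((c : Nat) : Int) 0))
        else m) m) m = appCol m c (bubbleC n (getCol m c)) := by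
  conv_lhs => rw [(appCol_getCol m c hc).symm]
  unfold bubbleC
  refine foldl_lift _ m c _ (fun g i => passC g (n-1-i)) (fun v i _ _ => length_passC v _) ?_
    (getCol m c) (by simp [getCol])
  intro v i hi hv
  have hilt : i < n - 1 := List.mem_range.mp hi
  exact inner_lift m c (n-1-i) hc (by omega) v hv

lemma col_fold (matrix : List (List Int)) :
    ∀ (L : List Int), (∀ col ∈ L, 0 ≤ col ∧ RowsOK matrix col.toNat) →
    ∀ (m : List (List Int)), m.map List.length = matrix.map List.length →
    L.foldl (fun m col =>
      (List.range (matrix.length - 1)).foldl (fun m i =>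
        (List.range (matrix.length - 1 - i)).foldl (fun m j =>
          if PySem.List.pyGetD (m.getD (j+1) []) col 0 <
              PySem.List.pyGetD (m.getD j []) col 0 then
            (m.set j (PySem.List.pySetD (m.getD j []) col
                (PySem.List.pyGetD (m.getD (j+1) []) col 0))).set (j+1)
              (PySem.List.pySetD (m.getD (j+1) []) col
                (PySem.List.pyGetD (m.getD j []) col 0))
          else m) m) m) m
    = L.foldl (fun m col =>
      (m.zip (PySem.List.sorted (m.map (fun row => PySem.List.pyGetD row col 0))
          (fun x => x))).map (fun rv => PySem.List.pySetD rv.1 col rv.2)) m := by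
  intro L
  induction L with
  | nil => intro _ m _; rfl
  | cons col L ih =>
    intro hL m hshape
    obtain ⟨h0, hro⟩ := hL col (by simp)
    have hcol : col = ((col.toNat : Nat) : Int) := (Int.toNat_of_nonneg h0).symm
    have hrom : RowsOK m col.toNat := rowsOK_of_map_length matrix m _ hshape hro
    have hlen : m.length = matrix.length := by
      have h := congrArg List.length hshape; simpa using h
    have hglen : (getCol m col.toNat).length = matrix.length := by simp [getCol, hlen]
    simp only [List.foldl_cons]
    rw [hcol]
    have hstepA := outer_lift m col.toNat matrix.length hlen.symm hrom
    rw [hstepA]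
    have hstepB : (m.zip (PySem.List.sorted
          (m.map (fun row => PySem.List.pyGetD row ((col.toNat : Nat) : Int) 0))
          (fun x => x))).map (fun rv => PySem.List.pySetD rv.1 ((col.toNat : Nat) : Int) rv.2)
        = appCol m col.toNat (bubbleC matrix.length (getCol m col.toNat)) := by
      simp only [PySem.List.pyGetD_natCast, PySem.List.pySetD_natCast]
      have hs : PySem.List.sorted (getCol m col.toNat) (fun x => x)
          = bubbleC matrix.length (getCol m col.toNat) := by
        rw [← hglen]; exact bubbleC_sorted (getCol m col.toNat)
      rw [show (m.map fun row => row.getD col.toNat 0) = getCol m col.toNat from rfl, hs]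
      rfl
    rw [hstepB]
    have hblen : (bubbleC matrix.length (getCol m col.toNat)).length = m.length := by
      rw [length_bubbleC]; simp [getCol]
    refine ih (fun c hc => hL c (by simp [hc])) _ ?_
    rw [map_length_appCol m col.toNat _ hblen, hshape]

-- ===== VERDICT (by name: the statement is the Claim_ definition above) =====
theorem variant_1_spec : Claim_equal_variant_1 := by
  unfold Claim_equal_variant_1
  intro matrix _hdom hpre
  unfold Spec_variant_1 variant_1 variant_1_alt
  refine col_fold matrix _ ?_ matrix rfl
  intro col hmem
  rw [PySem.List.mem_pyRange_iff_of_pos (by norm_num)] at hmem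
  obtain ⟨h0, hlt, hdvd⟩ := hmem
  refine ⟨h0, ?_⟩
  intro row hrow
  obtain ⟨t, ht⟩ := hdvd
  refine hpre.2 row hrow col.toNat (by omega) (by omega)
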